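-- pv_equiv track=rewrite | github.com/apabon123/futures-six | scripts/run_residual_trend_sanity.py | parse_universe
-- ===== SOURCE A (Python) =====
-- from typing import Optional
--
-- def parse_universe(universe_str: Optional[str]) -> Optional[list]:
--     """
--     Parse comma-separated universe string into list.
--
--     Args:
--         universe_str: Comma-separated string like "ES,NQ,RTY" or None
--
--     Returns:
--         List of symbols or None
--     """
--     if universe_str is None:
--         return None
--
--     # Split by comma and strip whitespace
--     symbols = [s.strip() for s in universe_str.split(',') if s.strip()]
--
--     # Map short names to database symbols
--     # Based on MarketData mapping logic:
--     # - Equities (ES, NQ, RTY): *_FRONT_CALENDAR_2D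
--     # - Rates volume (ZT, ZF, ZN, UB): *_FRONT_VOLUME
--     # - Rates calendar (SR3): SR3_FRONT_CALENDAR
--     # - FX (6E, 6B, 6J): *_FRONT_CALENDAR
--     # - Commodities (CL, GC): *_FRONT_VOLUME
--
--     fx_symbols = {'6E', '6B', '6J'}
--     equity_symbols = {'ES', 'NQ', 'RTY'}
--     rates_volume = {'ZT', 'ZF', 'ZN', 'UB'}
--     rates_calendar = {'SR3'}
--     commodities = {'CL', 'GC'}
--
--     db_symbols = []
--     for sym in symbols:
--         if sym in equity_symbols:
--             db_symbols.append(f"{sym}_FRONT_CALENDAR_2D")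
--         elif sym in rates_volume:
--             db_symbols.append(f"{sym}_FRONT_VOLUME")
--         elif sym in rates_calendar:
--             db_symbols.append(f"{sym}_FRONT_CALENDAR")
--         elif sym in fx_symbols:
--             db_symbols.append(f"{sym}_FRONT_CALENDAR")
--         elif sym in commodities:
--             db_symbols.append(f"{sym}_FRONT_VOLUME")
--         else:
--             # Assume it's already a database symbol
--             db_symbols.append(sym)
--
--     return db_symbols
-- ===== SOURCE B (Python) =====
-- from typing import Optional
--
-- _DB_TABLE = {
--     'ES': 'ES_FRONT_CALENDAR_2D', 'NQ': 'NQ_FRONT_CALENDAR_2D', 'RTY': 'RTY_FRONT_CALENDAR_2D',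
--     'ZT': 'ZT_FRONT_VOLUME', 'ZF': 'ZF_FRONT_VOLUME', 'ZN': 'ZN_FRONT_VOLUME', 'UB': 'UB_FRONT_VOLUME',
--     'SR3': 'SR3_FRONT_CALENDAR',
--     '6E': '6E_FRONT_CALENDAR', '6B': '6B_FRONT_CALENDAR', '6J': '6J_FRONT_CALENDAR',
--     'CL': 'CL_FRONT_VOLUME', 'GC': 'GC_FRONT_VOLUME',
-- }
--
-- def parse_universe(universe_str: Optional[str]) -> Optional[list]:
--     if universe_str is None:
--         return None
--     symbols = [s.strip() for s in universe_str.split(',') if s.strip()]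
--     return [_DB_TABLE.get(s, s) for s in symbols]
-- ===== Notes on version B (the rewrite author's own statement) =====
-- stated objective: simpler
-- what changed: Replaces the five literal sets and the six-way branch cascade with one precomputed short-name-to-database-name table, so the mapping is a single dict lookup with the symbol itself as default.
import Mathlib
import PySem

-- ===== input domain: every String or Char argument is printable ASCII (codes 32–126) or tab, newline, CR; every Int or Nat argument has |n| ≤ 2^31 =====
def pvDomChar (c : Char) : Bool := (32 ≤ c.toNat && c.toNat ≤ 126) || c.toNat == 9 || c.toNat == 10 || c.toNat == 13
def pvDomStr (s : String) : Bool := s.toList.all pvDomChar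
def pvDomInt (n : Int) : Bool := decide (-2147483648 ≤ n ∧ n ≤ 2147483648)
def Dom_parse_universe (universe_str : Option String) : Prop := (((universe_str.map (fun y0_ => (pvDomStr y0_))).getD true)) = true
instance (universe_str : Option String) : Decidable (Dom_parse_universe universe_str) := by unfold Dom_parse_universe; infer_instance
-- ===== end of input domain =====

-- B replaces A's five literal sets and six-way branch cascade by one precomputed
-- short-name → database-name table and a single dict lookup per symbol (objective: simpler).

-- ===== PORT A =====
def parse_universe (universe_str : Option String) : Option (List String) :=
  match universe_str with
  | none => none
  | some u =>
    let symbols := (((PySem.Str.split? u ",").getD []).filter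
        (fun s => PySem.Str.strip s ≠ "")).map (fun s => PySem.Str.strip s)
    let fx_symbols : PySem.Set String := PySem.Set.ofList ["6E", "6B", "6J"]
    let equity_symbols : PySem.Set String := PySem.Set.ofList ["ES", "NQ", "RTY"]
    let rates_volume : PySem.Set String := PySem.Set.ofList ["ZT", "ZF", "ZN", "UB"]
    let rates_calendar : PySem.Set String := PySem.Set.ofList ["SR3"]
    let commodities : PySem.Set String := PySem.Set.ofList ["CL", "GC"]
    some (symbols.foldl (fun db_symbols sym =>
      if PySem.Set.contains equity_symbols sym then db_symbols ++ [sym ++ "_FRONT_CALENDAR_2D"]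
      else if PySem.Set.contains rates_volume sym then db_symbols ++ [sym ++ "_FRONT_VOLUME"]
      else if PySem.Set.contains rates_calendar sym then db_symbols ++ [sym ++ "_FRONT_CALENDAR"]
      else if PySem.Set.contains fx_symbols sym then db_symbols ++ [sym ++ "_FRONT_CALENDAR"]
      else if PySem.Set.contains commodities sym then db_symbols ++ [sym ++ "_FRONT_VOLUME"]
      else db_symbols ++ [sym]) [])

-- ===== PORT B =====
def dbTable : PySem.Dict String String :=
  PySem.Dict.ofList
  [("ES", "ES_FRONT_CALENDAR_2D"), ("NQ", "NQ_FRONT_CALENDAR_2D"), ("RTY", "RTY_FRONT_CALENDAR_2D"),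
   ("ZT", "ZT_FRONT_VOLUME"), ("ZF", "ZF_FRONT_VOLUME"), ("ZN", "ZN_FRONT_VOLUME"), ("UB", "UB_FRONT_VOLUME"),
   ("SR3", "SR3_FRONT_CALENDAR"),
   ("6E", "6E_FRONT_CALENDAR"), ("6B", "6B_FRONT_CALENDAR"), ("6J", "6J_FRONT_CALENDAR"),
   ("CL", "CL_FRONT_VOLUME"), ("GC", "GC_FRONT_VOLUME")]

def parse_universe_alt (universe_str : Option String) : Option (List String) :=
  match universe_str with
  | none => none
  | some u =>
    let symbols := (((PySem.Str.split? u ",").getD []).filter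
        (fun s => PySem.Str.strip s ≠ "")).map (fun s => PySem.Str.strip s)
    some (symbols.map (fun s => PySem.Dict.getD dbTable s s))

-- ===== PRECONDITION & SPEC =====
def Spec_parse_universe (universe_str : Option String) (out : Option (List String)) : Prop := out = parse_universe_alt universe_str
instance (universe_str : Option String) (out : Option (List String)) : Decidable (Spec_parse_universe universe_str out) := by unfold Spec_parse_universe; infer_instance

-- ===== CLAIM (what is proved, stated in full; the proofs are below) =====
def Claim_equal_parse_universe : Prop := ∀ (universe_str : Option String), Dom_parse_universe universe_str → Spec_parse_universe universe_str (parse_universe universe_str)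

-- ===== LEMMAS AND PROOFS =====

-- per-symbol: A's branch cascade equals one lookup in B's table (keys are distinct, so order is irrelevant)
theorem cascade_eq_lookup (sym : String) :
    (if PySem.Set.contains (PySem.Set.ofList ["ES", "NQ", "RTY"]) sym then sym ++ "_FRONT_CALENDAR_2D"
     else if PySem.Set.contains (PySem.Set.ofList ["ZT", "ZF", "ZN", "UB"]) sym then sym ++ "_FRONT_VOLUME"
     else if PySem.Set.contains (PySem.Set.ofList ["SR3"]) sym then sym ++ "_FRONT_CALENDAR"
     else if PySem.Set.contains (PySem.Set.ofList ["6E", "6B", "6J"]) sym then sym ++ "_FRONT_CALENDAR"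
     else if PySem.Set.contains (PySem.Set.ofList ["CL", "GC"]) sym then sym ++ "_FRONT_VOLUME"
     else sym) = PySem.Dict.getD dbTable sym sym := by
  have hitems : dbTable.items = [("ES", "ES_FRONT_CALENDAR_2D"), ("NQ", "NQ_FRONT_CALENDAR_2D"), ("RTY", "RTY_FRONT_CALENDAR_2D"), ("ZT", "ZT_FRONT_VOLUME"), ("ZF", "ZF_FRONT_VOLUME"), ("ZN", "ZN_FRONT_VOLUME"), ("UB", "UB_FRONT_VOLUME"), ("SR3", "SR3_FRONT_CALENDAR"), ("6E", "6E_FRONT_CALENDAR"), ("6B", "6B_FRONT_CALENDAR"), ("6J", "6J_FRONT_CALENDAR"), ("CL", "CL_FRONT_VOLUME"), ("GC", "GC_FRONT_VOLUME")] := rfl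
  simp only [PySem.Set.contains, PySem.Set.ofList, PySem.Dict.getD, PySem.Dict.get?, hitems]
  by_cases h1 : sym = "ES"
  · subst h1; rfl
  by_cases h2 : sym = "NQ"
  · subst h2; rfl
  by_cases h3 : sym = "RTY"
  · subst h3; rfl
  by_cases h4 : sym = "ZT"
  · subst h4; rfl
  by_cases h5 : sym = "ZF"
  · subst h5; rfl
  by_cases h6 : sym = "ZN"
  · subst h6; rfl
  by_cases h7 : sym = "UB"
  · subst h7; rfl
  by_cases h8 : sym = "SR3"
  · subst h8; rfl
  by_cases h9 : sym = "6E"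
  · subst h9; rfl
  by_cases h10 : sym = "6B"
  · subst h10; rfl
  by_cases h11 : sym = "6J"
  · subst h11; rfl
  by_cases h12 : sym = "CL"
  · subst h12; rfl
  by_cases h13 : sym = "GC"
  · subst h13; rfl
  simp [List.find?, (show ("ES" == sym) = false by simp [Ne.symm h1]), (show ("NQ" == sym) = false by simp [Ne.symm h2]), (show ("RTY" == sym) = false by simp [Ne.symm h3]), (show ("ZT" == sym) = false by simp [Ne.symm h4]), (show ("ZF" == sym) = false by simp [Ne.symm h5]), (show ("ZN" == sym) = false by simp [Ne.symm h6]), (show ("UB" == sym) = false by simp [Ne.symm h7]), (show ("SR3" == sym) = false by simp [Ne.symm h8]), (show ("6E" == sym) = false by simp [Ne.symm h9]), (show ("6B" == sym) = false by simp [Ne.symm h10]), (show ("6J" == sym) = false by simp [Ne.symm h11]), (show ("CL" == sym) = false by simp [Ne.symm h12]), (show ("GC" == sym) = false by simp [Ne.symm h13]), h1, h2, h3, h4, h5, h6, h7, h8, h9, h10, h11, h12, h13]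

-- ===== VERDICT (by name: the statement is the Claim_ definition above) =====
theorem parse_universe_spec : Claim_equal_parse_universe := by
  intro universe_str _
  unfold Spec_parse_universe parse_universe parse_universe_alt
  cases universe_str with
  | none => rfl
  | some u =>
    dsimp only
    simp only [Option.some.injEq]
    have hbody : (fun (db_symbols : List String) (sym : String) =>
        if PySem.Set.contains (PySem.Set.ofList ["ES", "NQ", "RTY"]) sym then db_symbols ++ [sym ++ "_FRONT_CALENDAR_2D"]
        else if PySem.Set.contains (PySem.Set.ofList ["ZT", "ZF", "ZN", "UB"]) sym then db_symbols ++ [sym ++ "_FRONT_VOLUME"]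
        else if PySem.Set.contains (PySem.Set.ofList ["SR3"]) sym then db_symbols ++ [sym ++ "_FRONT_CALENDAR"]
        else if PySem.Set.contains (PySem.Set.ofList ["6E", "6B", "6J"]) sym then db_symbols ++ [sym ++ "_FRONT_CALENDAR"]
        else if PySem.Set.contains (PySem.Set.ofList ["CL", "GC"]) sym then db_symbols ++ [sym ++ "_FRONT_VOLUME"]
        else db_symbols ++ [sym]) =
        (fun (db_symbols : List String) (sym : String) => db_symbols ++ [PySem.Dict.getD dbTable sym sym]) := by
      funext db_symbols sym
      rw [← cascade_eq_lookup sym]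
      split_ifs <;> rfl
    rw [hbody, PySem.List.foldl_append_singleton_eq_map]
    simp
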